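-- pv_equiv track=rewrite | github.com/CodeCommandante/cryptography-portfolio | ciphers.py | __unsort_keyword_mapping
-- ===== SOURCE A (Python) =====
-- def __unsort_keyword_mapping(keyword_map: list, keyword: str) -> list:
--     for i in range(len(keyword) - 1):
--         j = i
--         while j < len(keyword_map):
--             if keyword[i] == keyword_map[j][0] and i == j:
--                 break
--             elif keyword[i] == keyword_map[j][0]:
--                 temp = keyword_map[i]
--                 keyword_map[i] = keyword_map[j]
--                 keyword_map[j] = temp
--                 break
--             j += 1
--     return keyword_map
-- ===== SOURCE B (Python) =====
-- from bisect import bisect_left, insort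
--
--
-- def __unsort_keyword_mapping(keyword_map: list, keyword: str) -> list:
--     # char -> sorted list of positions whose entry currently starts with that char
--     index = {}
--     for p, entry in enumerate(keyword_map):
--         index.setdefault(entry[0], []).append(p)
--     for i in range(len(keyword) - 1):
--         ps = index.get(keyword[i], [])
--         k = bisect_left(ps, i)
--         if k == len(ps):
--             continue
--         j = ps[k]
--         if j == i:
--             continue
--         c2 = keyword_map[i][0]
--         keyword_map[i], keyword_map[j] = keyword_map[j], keyword_map[i]
--         ps.pop(k)
--         insort(ps, i)
--         ps2 = index[c2]
--         ps2.remove(i)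
--         insort(ps2, j)
--     return keyword_map
-- ===== Notes on version B (the rewrite author's own statement) =====
-- stated objective: faster
-- what changed: Replaces A's per-position linear rescan of keyword_map with a char->sorted-position-list index built once and maintained incrementally across swaps, locating each target position by bisection instead of an O(n) inner scan.
-- outside the precondition, e.g. on __unsort_keyword_mapping([''], 'a'): A returns [''], B raises IndexError
import Mathlib
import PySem

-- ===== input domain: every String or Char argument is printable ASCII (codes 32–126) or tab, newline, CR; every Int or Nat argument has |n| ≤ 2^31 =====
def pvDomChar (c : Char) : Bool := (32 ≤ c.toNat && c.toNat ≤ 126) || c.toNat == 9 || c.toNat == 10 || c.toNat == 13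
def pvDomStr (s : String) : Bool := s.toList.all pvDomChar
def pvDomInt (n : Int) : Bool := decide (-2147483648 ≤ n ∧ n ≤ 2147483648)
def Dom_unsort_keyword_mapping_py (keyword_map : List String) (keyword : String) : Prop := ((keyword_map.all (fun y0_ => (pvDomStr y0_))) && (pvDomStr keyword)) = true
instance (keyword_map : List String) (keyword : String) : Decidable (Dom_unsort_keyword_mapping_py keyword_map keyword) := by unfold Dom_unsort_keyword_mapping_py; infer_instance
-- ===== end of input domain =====

-- B replaces A's per-position linear rescan with a char->sorted-position-list index maintained
-- across swaps (bisect lookup); measurably faster. Both A and B mutate keyword_map in place in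
-- Python in the same way; the equivalence proved here is about the returned list.

-- ===== PORT A =====

-- Python s[0]; Pre_ guarantees every scanned entry is nonempty, so the default is never used.
def head0 (s : String) : Char := s.toList.headD ' '

-- temp = km[i]; km[i] = km[j]; km[j] = temp  (0 ≤ i ≤ j < km.length at every use)
def pvSwap (km : List String) (i j : Nat) : List String :=
  (km.set i (km.getD j "")).set j (km.getD i "")

-- the inner `while j < len(keyword_map)` scan of A
def pvInnerA (km : List String) (c : Char) (i : Nat) (j : Nat) : List String :=
  if _h : j < km.length then
    if c == head0 (km.getD j "") then
      if i == j then km else pvSwap km i j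
    else pvInnerA km c i (j + 1)
  else km
termination_by km.length - j

def unsort_keyword_mapping_py (keyword_map : List String) (keyword : String) : List String :=
  (List.range (keyword.toList.length - 1)).foldl
    (fun km i => pvInnerA km (keyword.toList.getD i ' ') i i) keyword_map

-- ===== PORT B =====

-- keyword_map[i], keyword_map[j] = keyword_map[j], keyword_map[i]  (j an index taken from the position lists)
def pvSwapZ (km : List String) (i : Nat) (j : Int) : List String :=
  PySem.List.pySetD (km.set i (PySem.List.pyGetD km j "")) j (km.getD i "")

-- index = {}; for p, entry in enumerate(keyword_map): index.setdefault(entry[0], []).append(p)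
def pvBuildIdx (km : List String) : PySem.Dict Char (List Int) :=
  (PySem.List.enumerate km).foldl
    (fun d q => d.modify (head0 q.2) [] (fun l => l ++ [q.1])) PySem.Dict.empty

-- one iteration of B's `for i in range(len(keyword) - 1)` loop
def pvStepB (km : List String) (idx : PySem.Dict Char (List Int)) (c : Char) (i : Nat) :
    List String × PySem.Dict Char (List Int) :=
  let ps := idx.getD c []
  let k := PySem.List.bisectLeft ps (i : Int)
  if hk : k < ps.length then
    let j := ps[k]
    if j == (i : Int) then (km, idx)
    else
      let c2 := head0 (km.getD i "")
      let km' := pvSwapZ km i j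
      let ps' := List.orderedInsert (· ≤ ·) (i : Int) (ps.eraseIdx k)
      let ps2' := List.orderedInsert (· ≤ ·) j ((idx.getD c2 []).erase (i : Int))
      (km', (idx.insert c ps').insert c2 ps2')
  else (km, idx)

def unsort_keyword_mapping_py_alt (keyword_map : List String) (keyword : String) : List String :=
  ((List.range (keyword.toList.length - 1)).foldl
    (fun s i => pvStepB s.1 s.2 (keyword.toList.getD i ' ') i)
    (keyword_map, pvBuildIdx keyword_map)).1

-- ===== PRECONDITION & SPEC =====

-- Pre_ excludes keyword_maps containing an empty string: A raises IndexError ("" has no char 0)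
-- whenever its scan reaches such an entry (B's index build always raises there).  This is slightly
-- narrower than A's exact raise set: A still returns when no scan reaches the empty entry
-- (e.g. ([""], "a"), where the outer loop body never runs).
def Pre_unsort_keyword_mapping_py (keyword_map : List String) (keyword : String) : Prop :=
  ∀ s ∈ keyword_map, s ≠ ""
instance (keyword_map : List String) (keyword : String) : Decidable (Pre_unsort_keyword_mapping_py keyword_map keyword) := by unfold Pre_unsort_keyword_mapping_py; infer_instance

def pvWitness_unsort_keyword_mapping_py : List String × String := (["banana", "apple", "cherry"], "cab")

def Spec_unsort_keyword_mapping_py (keyword_map : List String) (keyword : String) (out : List String) : Prop := out = unsort_keyword_mapping_py_alt keyword_map keyword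
instance (keyword_map : List String) (keyword : String) (out : List String) : Decidable (Spec_unsort_keyword_mapping_py keyword_map keyword out) := by unfold Spec_unsort_keyword_mapping_py; infer_instance

-- ===== CLAIM (what is proved, stated in full; the proofs are below) =====
def Claim_equal_unsort_keyword_mapping_py : Prop := ∀ (keyword_map : List String) (keyword : String), Dom_unsort_keyword_mapping_py keyword_map keyword → Pre_unsort_keyword_mapping_py keyword_map keyword → Spec_unsort_keyword_mapping_py keyword_map keyword (unsort_keyword_mapping_py keyword_map keyword)

-- ===== LEMMAS AND PROOFS =====

-- the positions of entries whose first char is c, in increasing order (Nat view and Int view)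
def pvPN (km : List String) (c : Char) : List Nat :=
  (List.range km.length).filter (fun p => head0 (km.getD p "") == c)

def pvPZ (km : List String) (c : Char) : List Int := (pvPN km c).map (fun p : Nat => (p : Int))

-- B's index always holds exactly the current position lists
def pvInv (idx : PySem.Dict Char (List Int)) (km : List String) : Prop :=
  ∀ c, idx.getD c [] = pvPZ km c

lemma mem_pvPN {km : List String} {c : Char} {p : Nat} :
    p ∈ pvPN km c ↔ p < km.length ∧ head0 (km.getD p "") = c := by
  simp [pvPN, List.mem_filter, List.mem_range]

lemma pairwise_pvPN (km : List String) (c : Char) : (pvPN km c).Pairwise (· < ·) :=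
  List.pairwise_lt_range.filter _

lemma pairwise_pvPZ (km : List String) (c : Char) : (pvPZ km c).Pairwise (· < ·) := by
  unfold pvPZ
  rw [List.pairwise_map]
  exact (pairwise_pvPN km c).imp (fun h => by exact_mod_cast h)

lemma nodup_pvPZ (km : List String) (c : Char) : (pvPZ km c).Nodup :=
  (pairwise_pvPZ km c).imp (fun h => ne_of_lt h)

lemma mem_pvPZ {km : List String} {c : Char} {x : Int} :
    x ∈ pvPZ km c ↔ ∃ p : Nat, x = (p : Int) ∧ p < km.length ∧ head0 (km.getD p "") = c := by
  unfold pvPZ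
  rw [List.mem_map]
  constructor
  · rintro ⟨p, hp, rfl⟩; exact ⟨p, rfl, mem_pvPN.1 hp⟩
  · rintro ⟨p, rfl, hp⟩; exact ⟨p, mem_pvPN.2 hp, rfl⟩

lemma pvBuildIdx_getD_aux (km : List String) (c : Char) :
    ((PySem.List.enumerate km).foldl
      (fun d q => d.modify (head0 q.2) [] (fun l => l ++ [q.1])) PySem.Dict.empty).getD c [] =
    ((List.range km.length).filter (fun p => head0 (km.getD p "") == c)).map
      (fun p : Nat => (p : Int)) := by
  rw [← List.foldl_map (f := fun q : Int × String => (head0 q.2, q.1))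
      (g := fun (d : PySem.Dict Char (List Int)) (p : Char × Int) => d.modify p.1 [] (fun l => l ++ [p.2]))]
  rw [PySem.Dict.getD_foldl_modify_append]
  rw [PySem.List.enumerate_eq_map_pyRange km ""]
  simp only [PySem.List.len, PySem.List.pyRange_zero_natCast, List.map_map, List.filter_map]
  simp only [PySem.Dict.getD_empty, List.nil_append]
  have h1 : ((fun p : Char × Int => p.1 == c) ∘ (fun q : Int × String => (head0 q.2, q.1)) ∘
        (fun j : Int => (j, PySem.List.pyGetD km j "")) ∘ fun k : Nat => (k : Int)) =
      (fun p : Nat => head0 (km.getD p "") == c) := by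
    funext p
    simp [Function.comp, PySem.List.pyGetD_natCast]
  rw [h1]
  exact List.map_congr_left (fun p hp => by simp [Function.comp])

lemma pvBuildIdx_getD (km : List String) (c : Char) :
    (pvBuildIdx km).getD c [] = pvPZ km c :=
  pvBuildIdx_getD_aux km c

-- two strictly increasing lists with the same members are equal
lemma pv_sorted_ext {l₁ l₂ : List Int} (h₁ : l₁.Pairwise (· < ·)) (h₂ : l₂.Pairwise (· < ·))
    (hm : ∀ x, x ∈ l₁ ↔ x ∈ l₂) : l₁ = l₂ := by
  have hnd₁ : l₁.Nodup := h₁.imp (fun h => ne_of_lt h)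
  have hnd₂ : l₂.Nodup := h₂.imp (fun h => ne_of_lt h)
  exact List.eq_of_perm_of_sorted
    (fun a b _ _ hab hba => absurd (lt_trans hab hba) (lt_irrefl _)) h₁ h₂
    ((List.perm_ext_iff_of_nodup hnd₁ hnd₂).2 hm)

-- the head of dropWhile (< x) on a strictly increasing list containing x is x
lemma pv_dw_head_of_mem {α} [LinearOrder α] {l : List α} {x : α}
    (hs : l.Pairwise (· < ·)) (hx : x ∈ l) :
    (l.dropWhile (fun y => decide (y < x))).head? = some x := by
  induction l with
  | nil => cases hx
  | cons a t ih =>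
    rw [List.pairwise_cons] at hs
    by_cases hax : a < x
    · have hxt : x ∈ t := by
        rcases List.mem_cons.1 hx with rfl | h
        · exact absurd hax (lt_irrefl _)
        · exact h
      rw [List.dropWhile_cons_of_pos (by simpa using hax)]
      exact ih hs.2 hxt
    · rw [List.dropWhile_cons_of_neg (by simpa using hax)]
      rcases List.mem_cons.1 hx with rfl | h
      · rfl
      · exact absurd (hs.1 x h) hax

-- skipping a value not in the list
lemma pv_dw_skip {l : List Nat} {j : Nat} (hj : j ∉ l) :
    l.dropWhile (fun y => decide (y < j)) = l.dropWhile (fun y => decide (y < j + 1)) := by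
  induction l with
  | nil => rfl
  | cons a t ih =>
    have haj : a ≠ j := fun h => hj (h ▸ List.mem_cons_self)
    by_cases h : a < j
    · rw [List.dropWhile_cons_of_pos (by simpa using h),
          List.dropWhile_cons_of_pos (by simp; omega)]
      exact ih (fun hm => hj (List.mem_cons_of_mem _ hm))
    · rw [List.dropWhile_cons_of_neg (by simpa using h),
          List.dropWhile_cons_of_neg (by simp; omega)]

-- dropWhile (< x) = drop k when everything before k is < x and everything from k on is ≥ x
lemma pv_dw_eq_drop {l : List Int} {x : Int} {k : Nat} (hk : k ≤ l.length)
    (h1 : ∀ j (hj : j < l.length), j < k → l[j] < x)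
    (h2 : ∀ j (hj : j < l.length), k ≤ j → x ≤ l[j]) :
    l.dropWhile (fun y => decide (y < x)) = l.drop k := by
  induction l generalizing k with
  | nil => simp
  | cons a t ih =>
    cases k with
    | zero =>
      have hax : x ≤ a := by simpa using h2 0 (by simp) (Nat.zero_le _)
      rw [List.dropWhile_cons_of_neg (by simp; omega)]
      simp
    | succ k' =>
      have hax : a < x := by simpa using h1 0 (by simp) (Nat.succ_pos _)
      rw [List.dropWhile_cons_of_pos (by simpa using hax)]
      simp only [List.drop_succ_cons]
      refine ih (by simpa using hk) (fun j hj hjk => ?_) (fun j hj hjk => ?_)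
      · simpa using h1 (j + 1) (by simpa using Nat.succ_lt_succ hj) (Nat.succ_lt_succ hjk)
      · simpa using h2 (j + 1) (by simpa using Nat.succ_lt_succ hj) (Nat.succ_le_succ hjk)

lemma pv_bisect_drop {l : List Int} {x : Int} (hs : l.Pairwise (· < ·)) :
    l.dropWhile (fun y => decide (y < x)) = l.drop (PySem.List.bisectLeft l x) := by
  obtain ⟨h0, h1, h2⟩ := PySem.List.bisectLeft_spec l x (hs.imp (fun h => le_of_lt h))
  exact pv_dw_eq_drop h0 h1 h2

-- dropWhile over the Int view is the cast of dropWhile over the Nat view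
lemma pv_dwPZ (km : List String) (c : Char) (i : Nat) :
    (pvPZ km c).dropWhile (fun y => decide (y < (i : Int))) =
      ((pvPN km c).dropWhile (fun y => decide (y < i))).map (fun p : Nat => (p : Int)) := by
  unfold pvPZ
  rw [List.dropWhile_map]
  have hpred : ((fun y => decide (y < (i : Int))) ∘ fun p : Nat => (p : Int)) =
      (fun y => decide (y < i)) := by funext p; simp
  rw [hpred]

-- characterisation of A's inner scan
lemma pvInnerA_eq (km : List String) (c : Char) (i j : Nat) (hij : i ≤ j) :
    pvInnerA km c i j =
      match ((pvPN km c).dropWhile (fun y => decide (y < j))).head? with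
      | none => km
      | some p => if p = i then km else pvSwap km i p := by
  suffices H : ∀ d j, km.length - j ≤ d → i ≤ j →
      pvInnerA km c i j =
        match ((pvPN km c).dropWhile (fun y => decide (y < j))).head? with
        | none => km
        | some p => if p = i then km else pvSwap km i p from H (km.length - j) j le_rfl hij
  intro d
  induction d with
  | zero =>
    intro j hdj _
    rw [pvInnerA, dif_neg (by omega)]
    have hnil : (pvPN km c).dropWhile (fun y => decide (y < j)) = [] :=
      List.dropWhile_eq_nil_iff.2 (fun x hx => by
        have := (mem_pvPN.1 hx).1
        simp only [decide_eq_true_eq]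
        omega)
    rw [hnil]
    rfl
  | succ d ih =>
    intro j hdj hij'
    by_cases hj : j < km.length
    · rw [pvInnerA, dif_pos hj]
      by_cases hc : c = head0 (km.getD j "")
      · have hjP : j ∈ pvPN km c := mem_pvPN.2 ⟨hj, hc.symm⟩
        rw [pv_dw_head_of_mem (pairwise_pvPN km c) hjP]
        rw [if_pos (by rw [beq_iff_eq]; exact hc)]
        by_cases hij2 : i = j
        · rw [if_pos (by rw [beq_iff_eq]; exact hij2)]
          simp [hij2]
        · rw [if_neg (by rw [beq_iff_eq]; exact hij2)]
          simp only [Ne.symm hij2, if_false]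
      · rw [if_neg (by rw [beq_iff_eq]; exact hc)]
        have hjP : j ∉ pvPN km c := fun hm => hc ((mem_pvPN.1 hm).2).symm
        rw [pv_dw_skip hjP]
        exact ih (j + 1) (by omega) (by omega)
    · rw [pvInnerA, dif_neg hj]
      have hnil : (pvPN km c).dropWhile (fun y => decide (y < j)) = [] :=
        List.dropWhile_eq_nil_iff.2 (fun x hx => by
          have := (mem_pvPN.1 hx).1
          simp only [decide_eq_true_eq]
          omega)
      rw [hnil]
      rfl

lemma length_pvSwap (km : List String) (i p : Nat) : (pvSwap km i p).length = km.length := by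
  simp [pvSwap]

lemma getD_pvSwap {km : List String} {i p : Nat} (hi : i < km.length) (hp : p < km.length)
    (hip : i ≠ p) (q : Nat) (hq : q < km.length) :
    (pvSwap km i p).getD q "" =
      if q = p then km.getD i "" else if q = i then km.getD p "" else km.getD q "" := by
  unfold pvSwap
  simp only [List.getD_eq_getElem?_getD, List.getElem?_set, List.length_set]
  rcases eq_or_ne q p with rfl | hqp
  · simp [hp]
  · have hpq : p ≠ q := Ne.symm hqp
    rcases eq_or_ne q i with rfl | hqi
    · simp [hpq, hi, hqp]
    · have hiq : i ≠ q := Ne.symm hqi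
      simp [hpq, hiq, hqp, hqi]

-- membership in eraseIdx on a nodup list
lemma pv_mem_eraseIdx {l : List Int} {k : Nat} (hnd : l.Nodup) (hk : k < l.length) (x : Int) :
    x ∈ l.eraseIdx k ↔ x ∈ l ∧ x ≠ l[k] := by
  induction l generalizing k with
  | nil => simp at hk
  | cons a t ih =>
    rw [List.nodup_cons] at hnd
    cases k with
    | zero =>
      simp only [List.eraseIdx_zero, List.tail_cons, List.getElem_cons_zero, List.mem_cons]
      constructor
      · intro hxt
        exact ⟨Or.inr hxt, fun h => hnd.1 (h ▸ hxt)⟩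
      · rintro ⟨rfl | hxt, hne⟩
        · exact absurd rfl hne
        · exact hxt
    | succ k' =>
      have hk' : k' < t.length := by simpa using hk
      simp only [List.eraseIdx_cons_succ, List.mem_cons, List.getElem_cons_succ,
        ih hnd.2 hk']
      constructor
      · rintro (rfl | ⟨hxt, hne⟩)
        · exact ⟨Or.inl rfl, fun h => hnd.1 (h ▸ t.getElem_mem hk')⟩
        · exact ⟨Or.inr hxt, hne⟩
      · rintro ⟨rfl | hxt, hne⟩
        · exact Or.inl rfl
        · exact Or.inr ⟨hxt, hne⟩

lemma pv_pairwise_lt_of_le_nodup {l : List Int} (h : l.Pairwise (· ≤ ·)) (hnd : l.Nodup) :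
    l.Pairwise (· < ·) :=
  (h.and hnd).imp (fun ⟨hle, hne⟩ => lt_of_le_of_ne hle hne)


lemma pv_ordIns_pairwise {l : List Int} {a : Int} (h : l.Pairwise (· < ·)) (ha : a ∉ l) :
    (List.orderedInsert (· ≤ ·) a l).Pairwise (· < ·) := by
  have hle : (List.orderedInsert (· ≤ ·) a l).Pairwise (· ≤ ·) :=
    List.Pairwise.orderedInsert a l (h.imp (fun hh => le_of_lt hh))
  have hnd : (List.orderedInsert (· ≤ ·) a l).Nodup :=
    ((List.perm_orderedInsert _ a l).nodup_iff).2 (List.nodup_cons.2 ⟨ha, h.imp (fun hh => ne_of_lt hh)⟩)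
  exact pv_pairwise_lt_of_le_nodup hle hnd

lemma mem_pvPZ_swap {km : List String} {i p : Nat} (hi : i < km.length) (hp : p < km.length)
    (hip : i ≠ p) (c : Char) (x : Int) :
    x ∈ pvPZ (pvSwap km i p) c ↔
      (x = (i : Int) ∧ head0 (km.getD p "") = c) ∨
      (x = (p : Int) ∧ head0 (km.getD i "") = c) ∨
      (x ∈ pvPZ km c ∧ x ≠ (i : Int) ∧ x ≠ (p : Int)) := by
  rw [mem_pvPZ]
  constructor
  · rintro ⟨q, rfl, hq, hh⟩
    rw [length_pvSwap] at hq
    rw [getD_pvSwap hi hp hip q hq] at hh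
    by_cases hqp : q = p
    · subst hqp
      rw [if_pos rfl] at hh
      exact Or.inr (Or.inl ⟨rfl, hh⟩)
    · rw [if_neg hqp] at hh
      by_cases hqi : q = i
      · subst hqi
        rw [if_pos rfl] at hh
        exact Or.inl ⟨rfl, hh⟩
      · rw [if_neg hqi] at hh
        refine Or.inr (Or.inr ⟨mem_pvPZ.2 ⟨q, rfl, hq, hh⟩, ?_, ?_⟩)
        · exact fun h => hqi (by exact_mod_cast h)
        · exact fun h => hqp (by exact_mod_cast h)
  · rintro (⟨rfl, hh⟩ | ⟨rfl, hh⟩ | ⟨hm, hni, hnp⟩)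
    · refine ⟨i, rfl, by rwa [length_pvSwap], ?_⟩
      rw [getD_pvSwap hi hp hip i hi, if_neg hip, if_pos rfl]
      exact hh
    · refine ⟨p, rfl, by rwa [length_pvSwap], ?_⟩
      rw [getD_pvSwap hi hp hip p hp, if_pos rfl]
      exact hh
    · obtain ⟨q, rfl, hq, hh⟩ := mem_pvPZ.1 hm
      refine ⟨q, rfl, by rwa [length_pvSwap], ?_⟩
      rw [getD_pvSwap hi hp hip q hq,
        if_neg (fun h => hnp (by exact_mod_cast congrArg (fun t : Nat => (t : Int)) h)),
        if_neg (fun h => hni (by exact_mod_cast congrArg (fun t : Nat => (t : Int)) h))]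
      exact hh

lemma pvPZ_swap_other {km : List String} {i p : Nat} (hi : i < km.length) (hp : p < km.length)
    (hip : i ≠ p) {c0 : Char} (h1 : head0 (km.getD p "") ≠ c0) (h2 : head0 (km.getD i "") ≠ c0) :
    pvPZ (pvSwap km i p) c0 = pvPZ km c0 := by
  refine pv_sorted_ext (pairwise_pvPZ _ _) (pairwise_pvPZ _ _) (fun x => ?_)
  rw [mem_pvPZ_swap hi hp hip]
  constructor
  · rintro (⟨rfl, hh⟩ | ⟨rfl, hh⟩ | ⟨hm, _, _⟩)
    · exact absurd hh h1
    · exact absurd hh h2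
    · exact hm
  · intro hm
    refine Or.inr (Or.inr ⟨hm, ?_, ?_⟩)
    · rintro rfl
      obtain ⟨q, hq, _, hh⟩ := mem_pvPZ.1 hm
      have : q = i := by exact_mod_cast hq.symm
      exact h2 (this ▸ hh)
    · rintro rfl
      obtain ⟨q, hq, _, hh⟩ := mem_pvPZ.1 hm
      have : q = p := by exact_mod_cast hq.symm
      exact h1 (this ▸ hh)

-- one loop iteration: B computes A's step and preserves the index invariant
lemma pvStep_eq (km : List String) (idx : PySem.Dict Char (List Int)) (c : Char) (i : Nat)
    (hinv : pvInv idx km) :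
    (pvStepB km idx c i).1 = pvInnerA km c i i ∧
      pvInv (pvStepB km idx c i).2 (pvStepB km idx c i).1 := by
  have hmap := pv_dwPZ km c i
  have hdrop : (pvPZ km c).dropWhile (fun y => decide (y < (i : Int))) =
      (pvPZ km c).drop (PySem.List.bisectLeft (pvPZ km c) (i : Int)) :=
    pv_bisect_drop (pairwise_pvPZ km c)
  simp only [pvStepB, hinv c]
  by_cases hk : PySem.List.bisectLeft (pvPZ km c) (i : Int) < (pvPZ km c).length
  · rw [dif_pos hk]
    -- the Nat position found by A's scan
    have h1 : (((pvPN km c).dropWhile (fun y => decide (y < i))).map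
        (fun p : Nat => (p : Int))).head? =
        some ((pvPZ km c)[PySem.List.bisectLeft (pvPZ km c) (i : Int)]) := by
      rw [← hmap, hdrop, List.head?_drop, List.getElem?_eq_getElem hk]
    rw [List.head?_map] at h1
    obtain ⟨p, hp_head?, hp_cast⟩ : ∃ p, ((pvPN km c).dropWhile
        (fun y => decide (y < i))).head? = some p ∧
        (p : Int) = (pvPZ km c)[PySem.List.bisectLeft (pvPZ km c) (i : Int)] := by
      cases hh : ((pvPN km c).dropWhile (fun y => decide (y < i))).head? with
      | none => rw [hh] at h1; cases h1
      | some p => rw [hh] at h1; exact ⟨p, rfl, by simpa using h1⟩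
    have hpmem : p ∈ pvPN km c :=
      (List.dropWhile_sublist _).subset (List.mem_of_mem_head? (by rw [hp_head?]; rfl))
    have hp_lt : p < km.length := (mem_pvPN.1 hpmem).1
    have hp_head : head0 (km.getD p "") = c := (mem_pvPN.1 hpmem).2
    have hip : i ≤ p := by
      have hnot := List.head?_dropWhile_not (fun y => decide (y < i)) (pvPN km c)
      rw [hp_head?] at hnot
      simpa using hnot
    have hA : pvInnerA km c i i = if p = i then km else pvSwap km i p := by
      rw [pvInnerA_eq km c i i le_rfl, hp_head?]
    by_cases hji : (pvPZ km c)[PySem.List.bisectLeft (pvPZ km c) (i : Int)] = (i : Int)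
    · have hpi : p = i := by rw [← hp_cast] at hji; exact_mod_cast hji
      rw [if_pos (by rw [beq_iff_eq]; exact hji)]
      rw [hA, if_pos hpi]
      exact ⟨rfl, hinv⟩
    · have hpi : p ≠ i := fun h => hji (by rw [← hp_cast, h])
      rw [if_neg (by rw [beq_iff_eq]; exact hji)]
      have hilt : i < p := lt_of_le_of_ne hip (Ne.symm hpi)
      have hi_lt : i < km.length := lt_trans hilt hp_lt
      have hipne : i ≠ p := Nat.ne_of_lt hilt
      have hc2ne : head0 (km.getD i "") ≠ c := by
        intro hc2
        have hiPN : i ∈ pvPN km c := mem_pvPN.2 ⟨hi_lt, hc2⟩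
        have hh := pv_dw_head_of_mem (pairwise_pvPN km c) hiPN
        rw [hp_head?] at hh
        exact hpi (Option.some.inj hh)
      have hiPZ : (i : Int) ∉ pvPZ km c := by
        intro hm
        obtain ⟨q, hq, _, hh⟩ := mem_pvPZ.1 hm
        have : q = i := by exact_mod_cast hq.symm
        exact hc2ne (this ▸ hh)
      have hpPZ2 : (p : Int) ∉ pvPZ km (head0 (km.getD i "")) := by
        intro hm
        obtain ⟨q, hq, _, hh⟩ := mem_pvPZ.1 hm
        have hqp : q = p := by exact_mod_cast hq.symm
        rw [hqp, hp_head] at hh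
        exact hc2ne hh.symm
      have hswap : pvSwapZ km i ((pvPZ km c)[PySem.List.bisectLeft (pvPZ km c) (i : Int)]) =
          pvSwap km i p := by
        rw [← hp_cast]
        unfold pvSwapZ pvSwap
        rw [PySem.List.pyGetD_natCast, PySem.List.pySetD_natCast]
      rw [hswap, hA, if_neg hpi]
      refine ⟨rfl, fun c0 => ?_⟩
      simp only [PySem.Dict.getD_insert]
      by_cases h2 : c0 = head0 (km.getD i "")
      · rw [if_pos h2, h2, hinv (head0 (km.getD i ""))]
        -- c2 branch: orderedInsert p ((pvPZ km c2).erase i) = pvPZ (swap) c2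
        have hEs : ((pvPZ km (head0 (km.getD i ""))).erase (i : Int)).Pairwise (· < ·) :=
          (pairwise_pvPZ _ _).sublist (List.erase_sublist)
        have hEm : ∀ x : Int, x ∈ (pvPZ km (head0 (km.getD i ""))).erase (i : Int) ↔
            x ≠ (i : Int) ∧ x ∈ pvPZ km (head0 (km.getD i "")) :=
          fun x => (nodup_pvPZ _ _).mem_erase_iff
        refine pv_sorted_ext ?_ (pairwise_pvPZ _ _) (fun x => ?_)
        · refine pv_ordIns_pairwise hEs (fun hm => ?_)
          rw [← hp_cast] at hm
          exact hpPZ2 ((hEm _).1 hm).2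
        · rw [List.mem_orderedInsert, hEm, mem_pvPZ_swap hi_lt hp_lt hipne, ← hp_cast]
          constructor
          · rintro (rfl | ⟨hni, hm⟩)
            · exact Or.inr (Or.inl ⟨rfl, rfl⟩)
            · refine Or.inr (Or.inr ⟨hm, hni, ?_⟩)
              rintro rfl
              exact hpPZ2 hm
          · rintro (⟨rfl, hh⟩ | ⟨rfl, _⟩ | ⟨hm, hni, _⟩)
            · exact absurd (hh.symm.trans hp_head) hc2ne
            · exact Or.inl rfl
            · exact Or.inr ⟨hni, hm⟩
      · rw [if_neg h2]
        by_cases h1 : c0 = c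
        · rw [if_pos h1, h1]
          -- c branch: orderedInsert i (eraseIdx k (pvPZ km c)) = pvPZ (swap) c
          have hEs : ((pvPZ km c).eraseIdx (PySem.List.bisectLeft (pvPZ km c) (i : Int))).Pairwise
              (· < ·) := (pairwise_pvPZ _ _).sublist (List.eraseIdx_sublist ..)
          have hEm := pv_mem_eraseIdx (nodup_pvPZ km c) hk
          refine pv_sorted_ext ?_ (pairwise_pvPZ _ _) (fun x => ?_)
          · refine pv_ordIns_pairwise hEs (fun hm => ?_)
            exact hiPZ ((hEm _).1 hm).1
          · rw [List.mem_orderedInsert, hEm, mem_pvPZ_swap hi_lt hp_lt hipne, ← hp_cast]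
            constructor
            · rintro (rfl | ⟨hm, hne⟩)
              · exact Or.inl ⟨rfl, hp_head⟩
              · refine Or.inr (Or.inr ⟨hm, ?_, hne⟩)
                rintro rfl
                exact hiPZ hm
            · rintro (⟨rfl, _⟩ | ⟨rfl, hh⟩ | ⟨hm, _, hnp⟩)
              · exact Or.inl rfl
              · exact absurd hh hc2ne
              · exact Or.inr ⟨hm, hnp⟩
        · rw [if_neg h1, hinv c0]
          exact (pvPZ_swap_other hi_lt hp_lt hipne
            (fun hh => h1 (hp_head.symm.trans hh).symm) (fun hh => h2 hh.symm)).symm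
  · rw [dif_neg hk]
    have hnil : (pvPN km c).dropWhile (fun y => decide (y < i)) = [] := by
      have hdnil : (pvPZ km c).drop (PySem.List.bisectLeft (pvPZ km c) (i : Int)) = [] :=
        List.drop_eq_nil_of_le (le_of_not_gt hk)
      rw [← hdrop, hmap] at hdnil
      exact List.map_eq_nil_iff.1 hdnil
    have hA : pvInnerA km c i i = km := by
      rw [pvInnerA_eq km c i i le_rfl, hnil]
      rfl
    rw [hA]
    exact ⟨rfl, hinv⟩

lemma pv_fold_eq (L : List Nat) (f : Nat → Char) (km : List String)
    (idx : PySem.Dict Char (List Int)) (hinv : pvInv idx km) :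
    (L.foldl (fun s i => pvStepB s.1 s.2 (f i) i) (km, idx)).1 =
      L.foldl (fun m i => pvInnerA m (f i) i i) km := by
  induction L generalizing km idx with
  | nil => rfl
  | cons a t ih =>
    obtain ⟨h1, h2⟩ := pvStep_eq km idx (f a) a hinv
    simp only [List.foldl_cons]
    calc ((t.foldl (fun s i => pvStepB s.1 s.2 (f i) i) (pvStepB km idx (f a) a))).1
        = t.foldl (fun m i => pvInnerA m (f i) i i) (pvStepB km idx (f a) a).1 := by
          exact ih _ _ h2
      _ = t.foldl (fun m i => pvInnerA m (f i) i i) (pvInnerA km (f a) a a) := by rw [h1]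

-- ===== VERDICT (by name: the statement is the Claim_ definition above) =====
theorem unsort_keyword_mapping_py_spec : Claim_equal_unsort_keyword_mapping_py := by
  intro km kw _ _
  unfold Spec_unsort_keyword_mapping_py unsort_keyword_mapping_py unsort_keyword_mapping_py_alt
  exact (pv_fold_eq _ _ _ _ (fun c => pvBuildIdx_getD km c)).symm
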